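-- pv_equiv track=rewrite | github.com/e9akhan/HB_NORTH_CRR | solution.py | filter_by_shape
-- ===== SOURCE A (Python) =====
-- def filter_by_shape(data):
--     """
--     Filter by shape.
--     """
--     shapes = ["Off-peak", "PeakWD", "PeakWE"]
--     off_peak, peak_we, peak_wd = [], [], []
--
--     for record in data:
--         if record["shape"] == shapes[0]:
--             off_peak.append(record)
--         elif record["shape"] == shapes[1]:
--             peak_wd.append(record)
--         else:
--             peak_we.append(record)
--
--     return off_peak, peak_wd, peak_we
-- ===== SOURCE B (Python) =====
-- def filter_by_shape(data):
--     """
--     Filter by shape.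
--     """
--     off_peak = [r for r in data if r["shape"] == "Off-peak"]
--     peak_wd = [r for r in data if r["shape"] == "PeakWD"]
--     peak_we = [r for r in data if r["shape"] not in ("Off-peak", "PeakWD")]
--     return off_peak, peak_wd, peak_we
-- ===== Notes on version B (the rewrite author's own statement) =====
-- stated objective: idiomatic
-- what changed: Replaces the single dispatch loop with three accumulators by three independent list comprehensions, one pass per output list, the last one negating the first two tests to keep the original catch-all else.
import Mathlib
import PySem

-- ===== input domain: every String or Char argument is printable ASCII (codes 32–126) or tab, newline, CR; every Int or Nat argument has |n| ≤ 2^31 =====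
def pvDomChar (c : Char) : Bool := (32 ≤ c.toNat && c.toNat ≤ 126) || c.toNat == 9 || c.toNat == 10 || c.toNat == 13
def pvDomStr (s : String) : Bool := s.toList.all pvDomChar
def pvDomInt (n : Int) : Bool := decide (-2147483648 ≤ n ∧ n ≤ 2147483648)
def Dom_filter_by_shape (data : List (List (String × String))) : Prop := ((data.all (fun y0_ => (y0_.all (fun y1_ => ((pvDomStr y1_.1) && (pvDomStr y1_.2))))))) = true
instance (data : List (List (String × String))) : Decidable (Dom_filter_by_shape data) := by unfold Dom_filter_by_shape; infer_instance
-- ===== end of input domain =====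

-- B replaces A's single three-way dispatch loop by three independent filtering passes (idiomatic); equivalence of return values is proved on records that carry a "shape" key.

-- dict lookup record["shape"]: first match in the association list; none = Python KeyError
def shapeGet? (r : List (String × String)) : Option String :=
  (r.find? (fun p => p.1 == "shape")).map (·.2)

-- ===== PORT A =====
-- the loop body of A's for-loop (state = (off_peak, peak_we, peak_wd), appends as in A)
def stepA (st : (List (List (String × String))) × (List (List (String × String))) × (List (List (String × String)))) (record : List (String × String)) :
    (List (List (String × String))) × (List (List (String × String))) × (List (List (String × String))) :=
  match shapeGet? record with
  | some s =>
    if s = "Off-peak" then (st.1 ++ [record], st.2.1, st.2.2)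
    else if s = "PeakWD" then (st.1, st.2.1, st.2.2 ++ [record])
    else (st.1, st.2.1 ++ [record], st.2.2)
  | none => st  -- Python raises KeyError here; excluded by Pre_

def filter_by_shape (data : List (List (String × String))) : (List (List (String × String))) × (List (List (String × String))) × (List (List (String × String))) :=
  let st := data.foldl stepA ([], [], [])
  (st.1, st.2.2, st.2.1)

-- ===== PORT B =====
def filter_by_shape_alt (data : List (List (String × String))) : (List (List (String × String))) × (List (List (String × String))) × (List (List (String × String))) :=
  let off_peak := data.filter (fun r => shapeGet? r == some "Off-peak")
  let peak_wd := data.filter (fun r => shapeGet? r == some "PeakWD")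
  let peak_we := data.filter (fun r => !(shapeGet? r == some "Off-peak" || shapeGet? r == some "PeakWD"))
  (off_peak, peak_wd, peak_we)

-- ===== PRECONDITION & SPEC =====
-- Pre_ excludes records missing the "shape" key, on which both Pythons raise KeyError.
def Pre_filter_by_shape (data : List (List (String × String))) : Prop :=
  (data.all (fun r => r.any (fun p => p.1 == "shape"))) = true
instance (data : List (List (String × String))) : Decidable (Pre_filter_by_shape data) := by unfold Pre_filter_by_shape; infer_instance
def pvWitness_filter_by_shape : (List (List (String × String))) :=
  [[("shape", "Off-peak")], [("shape", "PeakWD"), ("v", "1")], [("shape", "weird")]]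
def Spec_filter_by_shape (data : List (List (String × String))) (out : (List (List (String × String))) × (List (List (String × String))) × (List (List (String × String)))) : Prop := out = filter_by_shape_alt data
instance (data : List (List (String × String))) (out : (List (List (String × String))) × (List (List (String × String))) × (List (List (String × String)))) : Decidable (Spec_filter_by_shape data out) := by unfold Spec_filter_by_shape; infer_instance

-- ===== CLAIM (what is proved, stated in full; the proofs are below) =====
def Claim_equal_filter_by_shape : Prop := ∀ (data : List (List (String × String))), Dom_filter_by_shape data → Pre_filter_by_shape data → Spec_filter_by_shape data (filter_by_shape data)

-- ===== LEMMAS AND PROOFS =====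

lemma shapeGet_isSome_of_any (r : List (String × String))
    (h : r.any (fun p => p.1 == "shape") = true) : (shapeGet? r).isSome := by
  simp only [shapeGet?, Option.isSome_map]
  rcases List.any_eq_true.mp h with ⟨p, hp, hk⟩
  exact List.find?_isSome.mpr ⟨p, hp, hk⟩

lemma fold_eq_filters (l : List (List (String × String)))
    (h : (l.all (fun r => r.any (fun p => p.1 == "shape"))) = true)
    (op we wd : List (List (String × String))) :
    l.foldl stepA (op, we, wd)
    = (op ++ l.filter (fun r => shapeGet? r == some "Off-peak"),
       we ++ l.filter (fun r => !(shapeGet? r == some "Off-peak" || shapeGet? r == some "PeakWD")),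
       wd ++ l.filter (fun r => shapeGet? r == some "PeakWD")) := by
  induction l generalizing op we wd with
  | nil => simp
  | cons r t ih =>
    simp only [List.all_cons, Bool.and_eq_true] at h
    obtain ⟨hr, ht⟩ := h
    obtain ⟨s, hs⟩ := Option.isSome_iff_exists.mp (shapeGet_isSome_of_any r hr)
    rw [List.foldl_cons]
    by_cases h1 : s = "Off-peak"
    · subst h1
      rw [show stepA (op, we, wd) r = (op ++ [r], we, wd) by simp [stepA, hs]]
      rw [ih ht]
      simp [List.filter_cons, hs]
    · by_cases h2 : s = "PeakWD"
      · subst h2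
        rw [show stepA (op, we, wd) r = (op, we, wd ++ [r]) by simp [stepA, hs, h1]]
        rw [ih ht]
        simp [List.filter_cons, hs, h1]
      · rw [show stepA (op, we, wd) r = (op, we ++ [r], wd) by simp [stepA, hs, h1, h2]]
        rw [ih ht]
        simp [List.filter_cons, hs, h1, h2]

theorem filter_by_shape_spec : Claim_equal_filter_by_shape := by
  intro data _ hpre
  unfold Spec_filter_by_shape filter_by_shape filter_by_shape_alt
  rw [fold_eq_filters data hpre [] [] []]
  simp

-- ===== VERDICT (by name: the statement is the Claim_ definition above) =====
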